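-- pv_equiv track=rewrite | github.com/MrBrantCode/unitest_baseline | mut_generate/mist_train_cf/cf_75555/solution.py | canChoose
-- ===== SOURCE A (Python) =====
-- def canChoose(groups, nums):
--     j = 0
--     for group in groups:
--         while j <= len(nums)-len(group):
--             if nums[j:j+len(group)] == group:
--                 j += len(group)
--                 break
--             j += 1
--         else:
--             return False
--     return True
-- ===== SOURCE B (Python) =====
-- def canChoose(groups, nums):
--     rest = nums
--     for g in groups:
--         k = len(g)
--         while rest[:k] != g:
--             if not rest:
--                 return False
--             rest = rest[1:]
--         rest = rest[k:]
--     return True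
-- ===== Notes on version B (the rewrite author's own statement) =====
-- stated objective: alternative
-- what changed: B carries the remaining SUFFIX of nums as its state (shrinking the list, matching each group as a prefix of the current suffix) instead of A's integer index j with slice comparisons into the full array; same greedy earliest-match strategy expressed over a different data representation.
import Mathlib
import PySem

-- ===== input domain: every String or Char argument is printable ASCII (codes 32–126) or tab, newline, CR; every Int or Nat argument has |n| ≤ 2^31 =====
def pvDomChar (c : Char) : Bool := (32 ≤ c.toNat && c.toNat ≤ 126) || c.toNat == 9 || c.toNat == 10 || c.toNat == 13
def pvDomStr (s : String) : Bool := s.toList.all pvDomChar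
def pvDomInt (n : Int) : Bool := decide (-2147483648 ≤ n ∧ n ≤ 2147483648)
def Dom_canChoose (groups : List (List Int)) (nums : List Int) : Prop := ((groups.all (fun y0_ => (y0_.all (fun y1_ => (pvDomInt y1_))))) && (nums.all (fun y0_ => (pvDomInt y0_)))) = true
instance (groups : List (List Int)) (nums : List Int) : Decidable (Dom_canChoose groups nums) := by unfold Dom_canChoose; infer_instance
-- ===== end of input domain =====

-- B keeps the remaining SUFFIX of nums as its state (shrinking list, each group matched as a
-- prefix of that suffix) instead of A's integer index with slices; return values proved equal.

-- ===== PORT A =====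
-- inner `while` loop of A: scan j upward; `j <= len(nums)-len(group)` over ℤ;
-- returns `some (j+len(group))` on break (the updated j), `none` when the loop falls through.
def loopA (nums g : List Int) (j : Int) : Option Int :=
  if h : j ≤ (nums.length : Int) - (g.length : Int) then
    if PySem.List.slice nums (some j) (some (j + (g.length : Int))) = g then
      some (j + (g.length : Int))
    else loopA nums g (j + 1)
  else none
termination_by ((nums.length : Int) - (g.length : Int) - j + 1).toNat
decreasing_by omega

-- the `for group in groups` loop with running index j
def goA (nums : List Int) : List (List Int) → Int → Bool
  | [], _ => true
  | g :: gs, j =>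
    match loopA nums g j with
    | some j' => goA nums gs j'
    | none => false

def canChoose (groups : List (List Int)) (nums : List Int) : Bool :=
  goA nums groups 0

-- ===== PORT B =====
-- inner `while` loop of B: `while rest[:k] != g: if not rest: return False; rest = rest[1:]`
-- followed by `rest = rest[k:]`; returns the new suffix, `none` on the early `return False`.
def stepB (g : List Int) (rest : List Int) : Option (List Int) :=
  if rest.take g.length = g then some (rest.drop g.length)
  else
    match rest with
    | [] => none
    | _ :: t => stepB g t
termination_by rest.length

-- the `for g in groups` loop threading the suffix `rest`, short-circuiting on failure
def canChoose_alt (groups : List (List Int)) (nums : List Int) : Bool :=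
  (List.foldlM (fun rest g => stepB g rest) nums groups).isSome

-- ===== PRECONDITION & SPEC =====
def Spec_canChoose (groups : List (List Int)) (nums : List Int) (out : Bool) : Prop := out = canChoose_alt groups nums
instance (groups : List (List Int)) (nums : List Int) (out : Bool) : Decidable (Spec_canChoose groups nums out) := by unfold Spec_canChoose; infer_instance

-- ===== CLAIM =====
def Claim_equal_canChoose : Prop := ∀ (groups : List (List Int)) (nums : List Int), Dom_canChoose groups nums → Spec_canChoose groups nums (canChoose groups nums)

-- ===== LEMMAS AND PROOFS =====

theorem stepB_none_of_short (g : List Int) :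
    ∀ xs : List Int, xs.length < g.length → stepB g xs = none := by
  intro xs
  induction xs with
  | nil =>
    intro h
    rw [stepB.eq_def, if_neg]
    intro hg
    have := congrArg List.length hg
    simp at this
    omega
  | cons x t ih =>
    intro h
    rw [stepB.eq_def, if_neg]
    · exact ih (by simp only [List.length_cons] at h; omega)
    · intro hg
      have := congrArg List.length hg
      simp only [List.length_take, List.length_cons] at this h
      omega

theorem stepB_suffix (g : List Int) :
    ∀ (xs r : List Int), stepB g xs = some r → r <:+ xs := by
  intro xs
  induction xs with
  | nil =>
    intro r h
    rw [stepB.eq_def] at h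
    split at h
    · cases h; exact List.drop_suffix _ _
    · cases h
  | cons x t ih =>
    intro r h
    rw [stepB.eq_def] at h
    split at h
    · cases h; exact List.drop_suffix _ _
    · exact (ih r h).trans (List.suffix_cons _ _)

theorem loopA_eq_stepB (nums g : List Int) (j : Int)
    (h0 : 0 ≤ j) (hn : j ≤ (nums.length : Int)) :
    loopA nums g j =
      (stepB g (nums.drop j.toNat)).map
        (fun r => ((nums.length : Int) - (r.length : Int))) := by
  fun_induction loopA nums g j with
  | case1 j hc hm =>
    -- slice matches: stepB takes the prefix branch
    rw [PySem.List.slice_toNat nums h0 (by omega)] at hm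
    have hk : (j + (g.length : Int)).toNat - j.toNat = g.length := by omega
    rw [hk] at hm
    rw [stepB.eq_def, if_pos hm]
    simp only [Option.map_some, List.length_drop]
    congr 1
    omega
  | case2 j hc hm ih =>
    -- slice differs: g ≠ [] (else the empty slice would equal g), so stepB recurses on the tail
    rw [PySem.List.slice_toNat nums h0 (by omega)] at hm
    have hk : (j + (g.length : Int)).toNat - j.toNat = g.length := by omega
    rw [hk] at hm
    have hg : g ≠ [] := fun hgnil => hm (by simp [hgnil])
    have hglen : 1 ≤ g.length := List.length_pos_iff.mpr hg
    have hjlt : j.toNat < nums.length := by omega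
    have hj1 : (j + 1).toNat = j.toNat + 1 := by omega
    have hstep : stepB g (nums.drop j.toNat) = stepB g (nums.drop (j + 1).toNat) := by
      rw [stepB.eq_def, if_neg hm, hj1, List.drop_eq_getElem_cons hjlt]
    rw [hstep]
    exact ih (by omega) (by omega)
  | case3 j hc =>
    rw [stepB_none_of_short g _ (by simp only [List.length_drop]; omega)]
    rfl

theorem goA_eq_foldB (nums : List Int) (gs : List (List Int)) (j : Int)
    (h0 : 0 ≤ j) (hn : j ≤ (nums.length : Int)) :
    goA nums gs j =
      (List.foldlM (fun rest g => stepB g rest) (nums.drop j.toNat) gs).isSome := by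
  induction gs generalizing j with
  | nil => simp [goA, List.foldlM]
  | cons g gs ih =>
    rw [List.foldlM_cons]
    cases hc : stepB g (nums.drop j.toNat) with
    | none =>
      have hA : loopA nums g j = none := by
        rw [loopA_eq_stepB nums g j h0 hn, hc]; rfl
      simp [goA, hA, Option.bind]
    | some r =>
      have hsuf : r <:+ nums := (stepB_suffix g _ r hc).trans (List.drop_suffix _ _)
      have hrlen : r.length ≤ nums.length := hsuf.length_le
      have hrd : r = nums.drop (nums.length - r.length) := List.suffix_iff_eq_drop.mp hsuf
      have hA : loopA nums g j = some ((nums.length : Int) - (r.length : Int)) := by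
        rw [loopA_eq_stepB nums g j h0 hn, hc]; rfl
      have hnat : ((nums.length : Int) - (r.length : Int)).toNat = nums.length - r.length := by
        omega
      have hdrop : nums.drop ((nums.length : Int) - (r.length : Int)).toNat = r := by
        rw [hnat, ← hrd]
      simp only [goA, hA]
      rw [ih _ (by omega) (by omega), hdrop]
      rfl

-- ===== VERDICT =====
theorem canChoose_spec : Claim_equal_canChoose := by
  intro groups nums _
  unfold Spec_canChoose canChoose canChoose_alt
  have := goA_eq_foldB nums groups 0 le_rfl (by positivity)
  simpa using this
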